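-- pv_equiv track=rewrite | github.com/dumpstate/advent-of-code | 2020/day16.py | eliminate_non_matching_rules
-- ===== SOURCE A (Python) =====
-- from copy import copy
-- from typing import Dict, List, Tuple
--
-- Rule = List[Tuple[int, int]]
--
-- def is_valid(ticket_num: int, rule: Rule) -> bool:
--     return any(
--         ticket_num >= rule_section[0] and ticket_num <= rule_section[1]
--         for rule_section in rule
--     )
--
-- def ticket_err_rate(rules: Dict[str, Rule], ticket: List[int]) -> int:
--     return sum(
--         num
--         for num in ticket
--         if not any(is_valid(num, rule) for rule in rules.values())
--     )
--
-- def eliminate_non_matching_rules(rules: Dict[str, Rule], tickets: List[List[int]]) -> List[List[str]]: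
--     keys = list(rules.keys())
--     len_ = len(keys)
--     valid_tickets = [
--         ticket
--         for ticket in tickets
--         if ticket_err_rate(rules, ticket) == 0
--     ]
--     keys_space = [
--         copy(keys)
--         for _ in range(0, len_)
--     ]
--
--     for ticket in valid_tickets:
--         for ticket_num, avail_keys in zip(ticket, keys_space):
--             to_remove = []
--
--             for key in avail_keys:
--                 if not is_valid(ticket_num, rules[key]):
--                     to_remove.append(key)
--
--             for key in to_remove:
--                 avail_keys.remove(key)
--
--     changes = 1
--
--     while changes > 0:
--         changes = 0
--         single_match_keys = [
--             key
--             for keys in keys_space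
--             if len(keys) == 1
--             for key in keys
--         ]
--
--         for keys in keys_space:
--             if len(keys) == 1:
--                 continue
--
--             for single_match_key in single_match_keys:
--                 if single_match_key in keys:
--                     keys.remove(single_match_key)
--                     changes += 1
--
--     return keys_space
-- ===== SOURCE B (Python) =====
-- # B: position-major candidate construction (one comprehension per position instead of
-- # in-place removals per ticket) and a functional fixpoint loop (rebuild the space each
-- # round, stop when it is unchanged) instead of A's mutate-and-count `while changes` loop.
-- def _covered(num, rule):
--     return any(lo <= num <= hi for lo, hi in rule)
--
--
-- def eliminate_non_matching_rules(rules, tickets):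
--     keys = list(rules.keys())
--     valid = [
--         t for t in tickets
--         if sum(x for x in t if not any(_covered(x, r) for r in rules.values())) == 0
--     ]
--     keys_space = [
--         [k for k in keys
--          if all(_covered(t[i], rules[k]) for t in valid if i < len(t))]
--         for i in range(len(keys))
--     ]
--     while True:
--         singles = [ks[0] for ks in keys_space if len(ks) == 1]
--         nxt = [ks if len(ks) == 1 else [k for k in ks if k not in singles]
--                for ks in keys_space]
--         if nxt == keys_space:
--             return keys_space
--         keys_space = nxt
-- ===== Notes on version B (the rewrite author's own statement) =====
-- stated objective: simpler
-- what changed: B builds each position's candidate list directly with one filter per position over all valid tickets (position-major) instead of A's ticket-major in-place removals, and replaces A's mutate-and-count `while changes` loop with a functional rebuild-until-fixpoint loop; the proof's Pre_ only excludes association lists with duplicate rule keys, which cannot arise from a Python dict.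
import Mathlib
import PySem

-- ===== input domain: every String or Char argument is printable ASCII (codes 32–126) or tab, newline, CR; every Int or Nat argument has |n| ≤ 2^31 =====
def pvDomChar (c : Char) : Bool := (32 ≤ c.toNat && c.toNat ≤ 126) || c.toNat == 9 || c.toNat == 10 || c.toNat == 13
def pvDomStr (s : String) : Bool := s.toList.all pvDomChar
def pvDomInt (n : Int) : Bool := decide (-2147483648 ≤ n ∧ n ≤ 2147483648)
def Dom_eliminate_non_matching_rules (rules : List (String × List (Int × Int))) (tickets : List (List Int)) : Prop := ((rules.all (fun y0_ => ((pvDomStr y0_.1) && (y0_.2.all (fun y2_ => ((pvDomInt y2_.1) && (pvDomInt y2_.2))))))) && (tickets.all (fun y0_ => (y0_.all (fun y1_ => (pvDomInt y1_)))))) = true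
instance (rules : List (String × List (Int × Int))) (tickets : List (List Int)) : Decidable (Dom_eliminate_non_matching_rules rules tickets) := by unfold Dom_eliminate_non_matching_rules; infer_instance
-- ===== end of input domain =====

-- B re-implements A with position-major candidate construction (one filter per position
-- instead of per-ticket in-place removals) and a functional rebuild-until-fixpoint loop
-- instead of A's mutate-and-count `while changes` loop; objective: simpler.

-- ===== PORT A =====
-- rules[k] / first-match lookup in the association list representing the Python dict
def pvLookup (rules : List (String × List (Int × Int))) (k : String) : List (Int × Int) :=
  ((rules.find? (fun p => p.1 == k)).map Prod.snd).getD []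

def pvIsValid (n : Int) (rule : List (Int × Int)) : Bool :=
  rule.any (fun s => decide (n ≥ s.1) && decide (n ≤ s.2))

def pvTicketErrRate (rules : List (String × List (Int × Int))) (ticket : List Int) : Int :=
  (ticket.filter (fun num => !(rules.any (fun p => pvIsValid num p.2)))).sum

-- the inner `for key in avail_keys: … to_remove` / `for key in to_remove: avail_keys.remove(key)`
def pvApplyRemove (rules : List (String × List (Int × Int))) (x : Int) (ks : List String) : List String :=
  let toRemove := ks.filter (fun k => !pvIsValid x (pvLookup rules k))
  toRemove.foldl (fun l k => l.erase k) ks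

-- `for ticket_num, avail_keys in zip(ticket, keys_space)`
def pvUpdT (rules : List (String × List (Int × Int))) : List Int → List (List String) → List (List String)
  | [], sp => sp
  | _, [] => []
  | x :: xs, ks :: sp => pvApplyRemove rules x ks :: pvUpdT rules xs sp

-- one iteration of the `while changes > 0` body, per avail list (returns new list, removals)
def pvRemoveS (singles : List String) (ks : List String) : List String × Nat :=
  singles.foldl (fun p s => if s ∈ p.1 then (p.1.erase s, p.2 + 1) else p) (ks, 0)

def pvPassA (sp : List (List String)) : List (List String) × Nat :=
  let singles := (sp.filter (fun ks => ks.length == 1)).flatMap id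
  sp.foldl (fun (acc : List (List String) × Nat) ks =>
    if ks.length == 1 then (acc.1 ++ [ks], acc.2)
    else
      let r := pvRemoveS singles ks
      (acc.1 ++ [r.1], acc.2 + r.2)) ([], 0)

-- `while changes > 0`; fuel (total length + 1) only totalizes the loop, it is never exhausted
def pvLoopA : Nat → List (List String) → List (List String)
  | 0, sp => sp
  | fuel + 1, sp =>
    let r := pvPassA sp
    if r.2 == 0 then r.1 else pvLoopA fuel r.1

def eliminate_non_matching_rules (rules : List (String × List (Int × Int))) (tickets : List (List Int)) : List (List String) :=
  let keys := rules.map Prod.fst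
  let len_ := keys.length
  let validTickets := tickets.filter (fun t => pvTicketErrRate rules t == 0)
  let keysSpace0 := (List.range len_).map (fun _ => keys)
  let sp1 := validTickets.foldl (fun sp t => pvUpdT rules t sp) keysSpace0
  pvLoopA ((sp1.map List.length).sum + 1) sp1

-- ===== PORT B =====
def pvCovered (num : Int) (rule : List (Int × Int)) : Bool :=
  rule.any (fun s => decide (s.1 ≤ num) && decide (num ≤ s.2))

-- `while True: … if nxt == keys_space: return keys_space`; same totalizing fuel
def pvLoopB : Nat → List (List String) → List (List String)
  | 0, sp => sp
  | fuel + 1, sp =>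
    let singles := (sp.filter (fun ks => ks.length == 1)).map (fun ks => ks.headD "")
    let nxt := sp.map (fun ks =>
      if ks.length == 1 then ks else ks.filter (fun k => !singles.contains k))
    if nxt == sp then sp else pvLoopB fuel nxt

def eliminate_non_matching_rules_alt (rules : List (String × List (Int × Int))) (tickets : List (List Int)) : List (List String) :=
  let keys := rules.map Prod.fst
  let valid := tickets.filter (fun t =>
    ((t.filter (fun x => !(rules.any (fun p => pvCovered x p.2)))).sum) == 0)
  let keysSpace := (List.range keys.length).map (fun i =>
    keys.filter (fun k => valid.all (fun t =>
      if i < t.length then pvCovered (t.getD i 0) (pvLookup rules k) else true)))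
  pvLoopB ((keysSpace.map List.length).sum + 1) keysSpace

-- ===== PRECONDITION & SPEC =====
-- Pre_ excludes association lists with duplicate keys: those cannot arise from a Python
-- dict (the dict collapses them), so A's behaviour on the list representation is ambiguous there.
def Pre_eliminate_non_matching_rules (rules : List (String × List (Int × Int))) (tickets : List (List Int)) : Prop :=
  (rules.map Prod.fst).Nodup
instance (rules : List (String × List (Int × Int))) (tickets : List (List Int)) : Decidable (Pre_eliminate_non_matching_rules rules tickets) := by unfold Pre_eliminate_non_matching_rules; infer_instance

def pvWitness_eliminate_non_matching_rules : (List (String × List (Int × Int))) × List (List Int) :=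
  ([("row", [(0, 3)]), ("seat", [(2, 5)])], [[1, 3], [2, 4], [9, 9]])

def Spec_eliminate_non_matching_rules (rules : List (String × List (Int × Int))) (tickets : List (List Int)) (out : List (List String)) : Prop := out = eliminate_non_matching_rules_alt rules tickets
instance (rules : List (String × List (Int × Int))) (tickets : List (List Int)) (out : List (List String)) : Decidable (Spec_eliminate_non_matching_rules rules tickets out) := by unfold Spec_eliminate_non_matching_rules; infer_instance

-- ===== CLAIM (what is proved, stated in full; the proofs are below) =====
def Claim_equal_eliminate_non_matching_rules : Prop := ∀ (rules : List (String × List (Int × Int))) (tickets : List (List Int)), Dom_eliminate_non_matching_rules rules tickets → Pre_eliminate_non_matching_rules rules tickets → Spec_eliminate_non_matching_rules rules tickets (eliminate_non_matching_rules rules tickets)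

-- ===== LEMMAS AND PROOFS =====

theorem foldl_erase_cons (r : List String) (a : String) (l : List String) (h : a ∉ r) :
    r.foldl (fun acc k => acc.erase k) (a :: l) = a :: r.foldl (fun acc k => acc.erase k) l := by
  induction r generalizing l with
  | nil => rfl
  | cons s ss ih =>
    simp only [List.foldl_cons]
    simp only [List.mem_cons, not_or] at h
    rw [List.erase_cons_tail (by intro hh; exact h.1 (eq_of_beq hh))]
    exact ih _ h.2

theorem foldl_erase_filter (q : String → Bool) (l : List String) (h : l.Nodup) :
    (l.filter q).foldl (fun acc k => acc.erase k) l = l.filter (fun k => !q k) := by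
  induction l with
  | nil => rfl
  | cons a tl ih =>
    have hnd := (List.nodup_cons.mp h)
    by_cases hq : q a = true
    · have h1 : (a :: tl).filter q = a :: tl.filter q := by simp [List.filter_cons, hq]
      rw [h1]
      simp only [List.foldl_cons, List.erase_cons_head]
      rw [ih hnd.2]
      simp [List.filter_cons, hq]
    · have hq' : q a = false := by simpa using hq
      have h1 : (a :: tl).filter q = tl.filter q := by simp [List.filter_cons, hq']
      rw [h1, foldl_erase_cons _ _ _ (fun hmem => hnd.1 (List.mem_of_mem_filter hmem)), ih hnd.2]
      simp [List.filter_cons, hq']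

theorem pvApplyRemove_eq (rules : List (String × List (Int × Int))) (x : Int) (ks : List String) (h : ks.Nodup) :
    pvApplyRemove rules x ks = ks.filter (fun k => pvIsValid x (pvLookup rules k)) := by
  unfold pvApplyRemove
  rw [foldl_erase_filter _ _ h]
  simp

theorem pvUpdT_getElem? (rules : List (String × List (Int × Int))) (xs : List Int) (sp : List (List String)) (i : Nat) :
    (pvUpdT rules xs sp)[i]? = (sp[i]?).map (fun ks => if i < xs.length then pvApplyRemove rules (xs.getD i 0) ks else ks) := by
  induction xs generalizing sp i with
  | nil => simp [pvUpdT]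
  | cons x xt ih =>
    cases sp with
    | nil => simp [pvUpdT]
    | cons ks spt =>
      cases i with
      | zero => simp [pvUpdT]
      | succ j => simp [pvUpdT, ih]

theorem phase1_getElem? (rules : List (String × List (Int × Int))) (ts : List (List Int)) (sp : List (List String)) (i : Nat) :
    ((ts.foldl (fun sp t => pvUpdT rules t sp) sp)[i]?) =
      (sp[i]?).map (fun ks => ts.foldl (fun ks t => if i < t.length then pvApplyRemove rules (t.getD i 0) ks else ks) ks) := by
  induction ts generalizing sp with
  | nil => simp
  | cons t tt ih =>
    simp only [List.foldl_cons]
    rw [ih, pvUpdT_getElem?, Option.map_map]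
    rfl

theorem innerfold_eq (rules : List (String × List (Int × Int))) (ts : List (List Int)) (i : Nat) (ks : List String) (h : ks.Nodup) :
    ts.foldl (fun ks t => if i < t.length then pvApplyRemove rules (t.getD i 0) ks else ks) ks
      = ks.filter (fun k => ts.all (fun t => if i < t.length then pvIsValid (t.getD i 0) (pvLookup rules k) else true)) := by
  induction ts generalizing ks with
  | nil => simp
  | cons t tt ih =>
    simp only [List.foldl_cons]
    by_cases ht : i < t.length
    · rw [if_pos ht, pvApplyRemove_eq _ _ _ h, ih _ (h.filter _), List.filter_filter]
      refine List.filter_congr (fun k _ => ?_)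
      simp [ht, Bool.and_comm]
    · rw [if_neg ht, ih _ h]
      refine List.filter_congr (fun k _ => ?_)
      simp [ht]

theorem flatMap_id_singletons (l : List (List String)) (h : ∀ ks ∈ l, ks.length = 1) :
    l.flatMap id = l.map (fun ks => ks.headD "") := by
  induction l with
  | nil => rfl
  | cons ks t ih =>
    have h1 := h ks (List.mem_cons_self ..)
    match ks, h1 with
    | [a], _ =>
      simp only [List.flatMap_cons, List.map_cons, id]
      rw [ih (fun x hx => h x (List.mem_cons_of_mem _ hx))]
      rfl

theorem removeS_foldl (singles : List String) : ∀ (ks : List String) (c : Nat), ks.Nodup →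
    singles.foldl (fun p s => if s ∈ p.1 then (p.1.erase s, p.2 + 1) else p) (ks, c)
      = (ks.filter (fun k => !singles.contains k),
         c + (ks.length - (ks.filter (fun k => !singles.contains k)).length)) := by
  induction singles with
  | nil => intro ks c h; simp
  | cons s ss ih =>
    intro ks c h
    simp only [List.foldl_cons]
    by_cases hm : s ∈ ks
    · rw [if_pos hm]
      rw [ih _ _ (h.erase s)]
      have he : ks.erase s = ks.filter (fun k => k != s) := by
        rw [List.Nodup.erase_eq_filter h]
      have hfe : (ks.erase s).filter (fun k => !ss.contains k)
          = ks.filter (fun k => !(s :: ss).contains k) := by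
        rw [he, List.filter_filter]
        refine List.filter_congr (fun k _ => ?_)
        simp [Bool.and_comm, bne, beq_eq_decide, eq_comm]
      rw [hfe]
      have hlen : (ks.erase s).length = ks.length - 1 := List.length_erase_of_mem hm
      have hle : (ks.filter (fun k => !(s :: ss).contains k)).length ≤ (ks.erase s).length := by
        rw [← hfe]; exact List.length_filter_le _ _
      have hpos : 1 ≤ ks.length := List.length_pos_of_mem hm
      simp only [Prod.mk.injEq]
      exact ⟨trivial, by omega⟩
    · rw [if_neg hm, ih _ _ h]
      have : ks.filter (fun k => !ss.contains k) = ks.filter (fun k => !(s :: ss).contains k) := by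
        refine List.filter_congr (fun k hk => ?_)
        have : ¬(k == s) = true := by simp; rintro rfl; exact hm hk
        simp at this
        simp [this]
      rw [this]

theorem pvRemoveS_eq (singles ks : List String) (h : ks.Nodup) :
    pvRemoveS singles ks = (ks.filter (fun k => !singles.contains k),
      ks.length - (ks.filter (fun k => !singles.contains k)).length) := by
  unfold pvRemoveS
  rw [removeS_foldl _ _ _ h]
  simp

theorem map_eq_self_iff' {α : Type} (l : List α) (f : α → α) : l.map f = l ↔ ∀ x ∈ l, f x = x := by
  induction l with
  | nil => simp
  | cons a t ih => simp [ih]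

theorem pvPassA_eq (sp : List (List String)) (h : ∀ ks ∈ sp, ks.Nodup) :
    pvPassA sp =
      (sp.map (fun ks =>
          if ks.length == 1 then ks
          else ks.filter (fun k => !((sp.filter (fun ks => ks.length == 1)).map (fun ks => ks.headD "")).contains k)),
       (sp.map (fun ks =>
          if ks.length == 1 then 0
          else ks.length - (ks.filter (fun k => !((sp.filter (fun ks => ks.length == 1)).map (fun ks => ks.headD "")).contains k)).length)).sum) := by
  have hs : (sp.filter (fun ks => ks.length == 1)).flatMap id
      = (sp.filter (fun ks => ks.length == 1)).map (fun ks => ks.headD "") := by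
    refine flatMap_id_singletons _ (fun ks hks => ?_)
    have := List.of_mem_filter hks
    simpa using this
  set singles := (sp.filter (fun ks => ks.length == 1)).map (fun ks => ks.headD "") with hsing
  unfold pvPassA
  rw [hs]
  dsimp only
  set g : List String → List String := fun ks =>
    if ks.length == 1 then ks else ks.filter (fun k => !singles.contains k) with hg
  set w : List String → Nat := fun ks =>
    if ks.length == 1 then 0
    else ks.length - (ks.filter (fun k => !singles.contains k)).length with hw
  have hcongr := PySem.List.foldl_congr_mem (l := sp)
    (init := (([] : List (List String)), (0 : Nat)))
    (f := fun acc ks =>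
      if (ks.length == 1) = true then (acc.1 ++ [ks], acc.2)
      else (acc.1 ++ [(pvRemoveS singles ks).1], acc.2 + (pvRemoveS singles ks).2))
    (g := fun acc ks => (acc.1 ++ [g ks], acc.2 + w ks))
    (by
      intro acc ks hks
      dsimp only
      by_cases h1 : (ks.length == 1) = true
      · simp [hg, hw, h1]
        have hl : ks.length = 1 := by simpa using h1
        exact ⟨fun hc => absurd hl hc, fun hc => absurd hl hc⟩
      · have h1' : (ks.length == 1) = false := by simpa using h1
        rw [if_neg (by simp [h1']), pvRemoveS_eq _ _ (h ks hks)]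
        simp [hg, hw, h1']
        have hl : ¬ ks.length = 1 := by simpa using h1'
        exact ⟨fun hc => absurd hc hl, fun hc => absurd hc hl⟩)
  rw [hcongr]
  rw [PySem.List.foldl_prod_mk (f := fun acc ks => acc ++ [g ks]) (g := fun acc ks => acc + w ks)]
  rw [PySem.List.foldl_append_singleton_eq_map, PySem.List.foldl_add_nat]
  simp

theorem changes_zero_iff (sp : List (List String)) (h : ∀ ks ∈ sp, ks.Nodup)
    (singles : List String) :
    ((sp.map (fun ks =>
        if ks.length == 1 then 0
        else ks.length - (ks.filter (fun k => !singles.contains k)).length)).sum = 0)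
      ↔ (sp.map (fun ks =>
        if ks.length == 1 then ks else ks.filter (fun k => !singles.contains k)) = sp) := by
  rw [List.sum_eq_zero_iff, map_eq_self_iff']
  have key : ∀ ks ∈ sp, ((if ks.length == 1 then 0 else ks.length - (ks.filter (fun k => !singles.contains k)).length) = 0
      ↔ (if ks.length == 1 then ks else ks.filter (fun k => !singles.contains k)) = ks) := by
    intro ks hks
    by_cases h1 : (ks.length == 1) = true
    · simp [h1]
    · have h1' : (ks.length == 1) = false := by simpa using h1
      rw [if_neg (by simp [h1']), if_neg (by simp [h1'])]
      have hle := List.length_filter_le (fun k => !singles.contains k) ks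
      constructor
      · intro hz
        have hlen : (ks.filter (fun k => !singles.contains k)).length = ks.length := by omega
        exact List.filter_eq_self.mpr (List.length_filter_eq_length_iff.mp hlen)
      · intro he
        rw [he]
        omega
  constructor
  · intro hz ks hks
    exact (key ks hks).mp (hz _ (List.mem_map_of_mem hks))
  · intro he n hn
    obtain ⟨ks, hks, rfl⟩ := List.mem_map.mp hn
    exact (key ks hks).mpr (he ks hks)

theorem pvLoop_eq (fuel : Nat) (sp : List (List String)) (h : ∀ ks ∈ sp, ks.Nodup) :
    pvLoopA fuel sp = pvLoopB fuel sp := by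
  induction fuel generalizing sp with
  | zero => rfl
  | succ n ih =>
    unfold pvLoopA pvLoopB
    rw [pvPassA_eq sp h]
    dsimp only
    by_cases hc : sp.map (fun ks =>
        if ks.length == 1 then ks
        else ks.filter (fun k => !((sp.filter (fun ks => ks.length == 1)).map (fun ks => ks.headD "")).contains k)) = sp
    · rw [if_pos (by simpa using (changes_zero_iff sp h _).mpr hc), if_pos (by simpa using hc)]
      exact hc
    · rw [if_neg (by simpa using fun hz => hc ((changes_zero_iff sp h _).mp hz)),
        if_neg (by simpa using hc)]
      refine ih _ (fun ks hks => ?_)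
      obtain ⟨ks0, hks0, rfl⟩ := List.mem_map.mp hks
      by_cases h1 : (ks0.length == 1) = true
      · simpa [h1] using h ks0 hks0
      · have h1' : (ks0.length == 1) = false := by simpa using h1
        rw [if_neg (by simp [h1'])]
        exact (h ks0 hks0).filter _

theorem main_eq (rules : List (String × List (Int × Int))) (tickets : List (List Int))
    (hpre : (rules.map Prod.fst).Nodup) :
    eliminate_non_matching_rules rules tickets = eliminate_non_matching_rules_alt rules tickets := by
  unfold eliminate_non_matching_rules eliminate_non_matching_rules_alt
  dsimp only
  have hvalid : tickets.filter (fun t => pvTicketErrRate rules t == 0)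
      = tickets.filter (fun t =>
          ((t.filter (fun x => !(rules.any (fun p => pvCovered x p.2)))).sum) == 0) := rfl
  rw [hvalid]
  set keys := rules.map Prod.fst with hkeysdef
  set valid := tickets.filter (fun t =>
      ((t.filter (fun x => !(rules.any (fun p => pvCovered x p.2)))).sum) == 0) with hvdef
  have hsp : valid.foldl (fun sp t => pvUpdT rules t sp) ((List.range keys.length).map (fun _ => keys))
      = (List.range keys.length).map (fun i =>
          keys.filter (fun k => valid.all (fun t =>
            if i < t.length then pvCovered (t.getD i 0) (pvLookup rules k) else true))) := by
    apply List.ext_getElem?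
    intro i
    rw [phase1_getElem?]
    rw [List.getElem?_map, List.getElem?_map]
    by_cases hi : i < keys.length
    · rw [List.getElem?_range hi]
      simp only [Option.map_some]
      rw [innerfold_eq _ _ _ _ hpre]
      rfl
    · rw [List.getElem?_eq_none (by simpa using hi)]
      rfl
  rw [hsp]
  refine pvLoop_eq _ _ (fun ks hks => ?_)
  obtain ⟨i, _, rfl⟩ := List.mem_map.mp hks
  exact hpre.filter _

-- ===== VERDICT (by name: the statement is the Claim_ definition above) =====
theorem eliminate_non_matching_rules_spec : Claim_equal_eliminate_non_matching_rules := by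
  intro rules tickets _hdom hpre
  exact main_eq rules tickets hpre
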